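-- pv_equiv track=rewrite | github.com/Roddygithub/GW2Optimizer | backend/app/services/gear_optimization_service.py | _choose_baseline_prefix
-- ===== SOURCE A (Python) =====
-- from typing import Dict, List, Optional
--
-- def _choose_baseline_prefix(role_cat: str, candidates: List[str]) -> str:
--     """Choisit un préfixe de base offensif pour démarrer la recherche.
--
--     Pour les DPS, on privilégie Berserker puis Marauder/Valkyrie/Dragon.
--     Pour les autres rôles, on choisit un préfixe méta raisonnable.
--     """
--
--     if not candidates:
--         raise ValueError("No candidate prefixes available for gear optimization")
--
--     r = (role_cat or "").lower()
--
--     preferred_per_role = {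
--         "dps": ["Berserker", "Marauder", "Dragon", "Valkyrie", "Assassin", "Celestial"],
--         "heal": ["Minstrel", "Harrier", "Cleric", "Magi", "Celestial"],
--         "boon": ["Diviner", "Minstrel", "Harrier", "Celestial"],
--         "tank": ["Soldier", "Trailblazer", "Dire", "Minstrel", "Celestial"],
--         "support": ["Minstrel", "Harrier", "Celestial", "Cleric"],
--     }
--
--     ordered_candidates = candidates
--     for name in preferred_per_role.get(r, []):
--         if name in ordered_candidates:
--             return name
--
--     return ordered_candidates[0]
-- ===== SOURCE B (Python) =====
-- from typing import Dict, List, Optional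
--
-- def _choose_baseline_prefix(role_cat: str, candidates: List[str]) -> str:
--     """Choose a baseline gear prefix for the role: rank candidates by the role's
--     preference order (unranked names rank last) and take the first minimum."""
--     if not candidates:
--         raise ValueError("No candidate prefixes available for gear optimization")
--
--     r = (role_cat or "").lower()
--
--     preferred_per_role = {
--         "dps": ["Berserker", "Marauder", "Dragon", "Valkyrie", "Assassin", "Celestial"],
--         "heal": ["Minstrel", "Harrier", "Cleric", "Magi", "Celestial"],
--         "boon": ["Diviner", "Minstrel", "Harrier", "Celestial"],
--         "tank": ["Soldier", "Trailblazer", "Dire", "Minstrel", "Celestial"],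
--         "support": ["Minstrel", "Harrier", "Celestial", "Cleric"],
--     }
--
--     pref = preferred_per_role.get(r, [])
--     rank = {name: i for i, name in enumerate(pref)}
--     return min(candidates, key=lambda c: rank.get(c, len(pref)))
-- ===== Notes on version B (the rewrite author's own statement) =====
-- stated objective: alternative
-- what changed: Replaces the loop over the preferred list with a membership scan of candidates and early return by building a name->index rank dict once and taking the single rank-keyed min over candidates (min's first-minimum tie-break reproduces the preferred order and the candidates[0] fallback).
import Mathlib
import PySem

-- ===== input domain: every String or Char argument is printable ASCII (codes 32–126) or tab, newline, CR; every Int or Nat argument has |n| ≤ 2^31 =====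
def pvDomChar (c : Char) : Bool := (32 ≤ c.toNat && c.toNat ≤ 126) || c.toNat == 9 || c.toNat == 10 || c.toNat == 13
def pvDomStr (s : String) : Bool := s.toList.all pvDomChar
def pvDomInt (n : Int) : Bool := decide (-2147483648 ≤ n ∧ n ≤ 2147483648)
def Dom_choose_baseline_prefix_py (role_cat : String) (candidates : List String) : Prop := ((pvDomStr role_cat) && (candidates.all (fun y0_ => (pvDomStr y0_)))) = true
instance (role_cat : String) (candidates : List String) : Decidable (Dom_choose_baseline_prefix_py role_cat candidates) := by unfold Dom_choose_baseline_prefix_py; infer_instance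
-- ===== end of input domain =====

-- B replaces A's loop over the preferred list (membership test in candidates, early return)
-- by a rank dictionary built once from the preferred list and a single rank-keyed min over
-- the candidates (objective: alternative; same return value; Pre_ excludes the empty
-- candidate list on which both Pythons raise ValueError).


-- shared table: the same dict literal both Python versions contain
def preferredPerRole : PySem.Dict String (List String) :=
  PySem.Dict.ofList
    [ ("dps", ["Berserker", "Marauder", "Dragon", "Valkyrie", "Assassin", "Celestial"])
    , ("heal", ["Minstrel", "Harrier", "Cleric", "Magi", "Celestial"])
    , ("boon", ["Diviner", "Minstrel", "Harrier", "Celestial"])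
    , ("tank", ["Soldier", "Trailblazer", "Dire", "Minstrel", "Celestial"])
    , ("support", ["Minstrel", "Harrier", "Celestial", "Cleric"]) ]

-- ===== PORT A =====
-- the for-loop over the preferred names: first one contained in candidates, else none
def firstPref (cands : List String) : List String → Option String
  | [] => none
  | p :: ps => if p ∈ cands then some p else firstPref cands ps

def choose_baseline_prefix_py (role_cat : String) (candidates : List String) : String :=
  if candidates = [] then ""   -- Python raises ValueError here; excluded by Pre_
  else
    let r := PySem.Str.lower role_cat   -- (role_cat or "").lower(): 'or ""' is the identity on strings fed to .lower()
    match firstPref candidates (preferredPerRole.getD r []) with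
    | some name => name
    | none => candidates.headD ""       -- ordered_candidates[0]; candidates ≠ [] here

-- ===== PORT B =====
-- rank = {name: i for i, name in enumerate(pref)}
def rankDict (pref : List String) : PySem.Dict String Int :=
  (PySem.List.enumerate pref).foldl (fun d p => d.insert p.2 p.1) PySem.Dict.empty

def choose_baseline_prefix_py_alt (role_cat : String) (candidates : List String) : String :=
  if candidates = [] then ""   -- Python raises ValueError here; excluded by Pre_
  else
    let r := PySem.Str.lower role_cat
    let pref := preferredPerRole.getD r []
    let rank := rankDict pref
    match PySem.List.min? candidates (fun c => rank.getD c (pref.length : Int)) with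
    | some m => m
    | none => ""                        -- unreachable: candidates ≠ []

-- ===== PRECONDITION & SPEC =====
-- Pre_ excludes exactly the empty candidate list, on which A raises ValueError.
def Pre_choose_baseline_prefix_py (role_cat : String) (candidates : List String) : Prop :=
  candidates ≠ []
instance (role_cat : String) (candidates : List String) : Decidable (Pre_choose_baseline_prefix_py role_cat candidates) := by unfold Pre_choose_baseline_prefix_py; infer_instance

def pvWitness_choose_baseline_prefix_py : String × List String := ("dps", ["Cleric", "Berserker"])

def Spec_choose_baseline_prefix_py (role_cat : String) (candidates : List String) (out : String) : Prop := out = choose_baseline_prefix_py_alt role_cat candidates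
instance (role_cat : String) (candidates : List String) (out : String) : Decidable (Spec_choose_baseline_prefix_py role_cat candidates out) := by unfold Spec_choose_baseline_prefix_py; infer_instance

-- ===== CLAIM (what is proved, stated in full; the proofs are below) =====
def Claim_equal_choose_baseline_prefix_py : Prop := ∀ (role_cat : String) (candidates : List String), Dom_choose_baseline_prefix_py role_cat candidates → Pre_choose_baseline_prefix_py role_cat candidates → Spec_choose_baseline_prefix_py role_cat candidates (choose_baseline_prefix_py role_cat candidates)

-- ===== LEMMAS AND PROOFS =====

-- the rank a name gets in B: its first index in pref, or pref.length when absent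
def rkIdx : List String → String → Int
  | [], _ => 0
  | p :: ps, x => if x = p then 0 else rkIdx ps x + 1

-- min?'s folding step, named so the fold lemmas below can talk about it
def mstep (key : String → Int) : Option String → String → Option String
  | none, x => some x
  | some m, x => if key x < key m then some x else some m

lemma min?_cons (key : String → Int) (c : String) (cs : List String) :
    PySem.List.min? (c :: cs) key = cs.foldl (mstep key) (some c) := by
  simp only [PySem.List.min?, List.foldl_cons]
  apply List.foldl_ext
  intro acc x _
  cases acc <;> rfl

lemma rkIdx_nonneg (ps : List String) (x : String) : 0 ≤ rkIdx ps x := by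
  induction ps with
  | nil => simp [rkIdx]
  | cons p t ih => simp only [rkIdx]; split <;> omega

lemma rkIdx_of_not_mem (ps : List String) (x : String) (h : x ∉ ps) :
    rkIdx ps x = (ps.length : Int) := by
  induction ps with
  | nil => simp [rkIdx]
  | cons p t ih =>
    simp only [List.mem_cons, not_or] at h
    simp only [rkIdx, if_neg h.1, ih h.2, List.length_cons]
    push_cast
    ring

-- the dict built by B's comprehension looks names up to their rkIdx (nodup pref)
lemma enumFold_getD (ps : List String) (hnd : ps.Nodup) (d : PySem.Dict String Int)
    (s : Int) (x : String) (dflt : Int) :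
    ((PySem.List.enumerate ps s).foldl (fun d p => d.insert p.2 p.1) d).getD x dflt =
      if x ∈ ps then s + rkIdx ps x else d.getD x dflt := by
  induction ps generalizing d s with
  | nil => simp [PySem.List.enumerate_nil]
  | cons p t ih =>
    rw [PySem.List.enumerate_cons]
    simp only [List.foldl_cons]
    rw [ih (List.Nodup.of_cons hnd) (d.insert p s) (s + 1)]
    by_cases hxt : x ∈ t
    · have hxp : x ≠ p := by
        rintro rfl; exact (List.nodup_cons.mp hnd).1 hxt
      rw [if_pos hxt, if_pos (show x ∈ p :: t by simp [hxt])]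
      simp only [rkIdx, if_neg hxp]
      omega
    · by_cases hxp : x = p
      · subst hxp
        simp [hxt, rkIdx, PySem.Dict.getD_insert_self]
      · simp only [hxt, if_false, List.mem_cons, hxp, or_false]
        exact PySem.Dict.getD_insert_of_ne d s dflt hxp

lemma rank_getD_eq (pref : List String) (hnd : pref.Nodup) (x : String) :
    (rankDict pref).getD x (pref.length : Int) = rkIdx pref x := by
  rw [rankDict, enumFold_getD pref hnd _ 0 x]
  by_cases hx : x ∈ pref
  · simp [hx]
  · simp [hx, rkIdx_of_not_mem pref x hx, PySem.Dict.getD, PySem.Dict.get?, PySem.Dict.empty]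

-- every value of the preferred table is duplicate-free
lemma prefs_nodup (r : String) : (preferredPerRole.getD r []).Nodup := by
  simp only [PySem.Dict.getD, PySem.Dict.get?]
  cases hf : List.find? (fun p => p.1 == r) preferredPerRole.items with
  | none => simp
  | some pr =>
    have hm := List.mem_of_find?_eq_some hf
    have hitems : preferredPerRole.items =
        [ ("dps", ["Berserker", "Marauder", "Dragon", "Valkyrie", "Assassin", "Celestial"])
        , ("heal", ["Minstrel", "Harrier", "Cleric", "Magi", "Celestial"])
        , ("boon", ["Diviner", "Minstrel", "Harrier", "Celestial"])
        , ("tank", ["Soldier", "Trailblazer", "Dire", "Minstrel", "Celestial"])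
        , ("support", ["Minstrel", "Harrier", "Celestial", "Cleric"]) ] := rfl
    rw [hitems] at hm
    simp only [List.mem_cons, List.not_mem_nil, or_false] at hm
    rcases hm with rfl | rfl | rfl | rfl | rfl <;> decide

-- min?'s inner fold returns t when t is the unique element of minimal key
lemma foldMin_eq_unique {key : String → Int} (k : Int) (t : String) :
    ∀ (rest : List String) (m : String),
      (∀ x ∈ m :: rest, k ≤ key x) → key t = k →
      (∀ x ∈ m :: rest, key x = k → x = t) → t ∈ m :: rest →
      rest.foldl (mstep key) (some m) = some t := by
  intro rest
  induction rest with
  | nil =>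
    intro m _ _ _ hmem
    simp at hmem; simp [hmem]
  | cons y rest' ih =>
    intro m hmin hk huniq hmem
    simp only [List.foldl_cons, mstep]
    by_cases hlt : key y < key m
    · simp only [hlt, if_pos]
      have htm : t ≠ m := by
        rintro rfl
        have := hmin y (by simp)
        omega
      apply ih y
      · intro x hx; exact hmin x (by simp at hx ⊢; tauto)
      · exact hk
      · intro x hx hxk; exact huniq x (by simp at hx ⊢; tauto) hxk
      · simp at hmem ⊢; tauto
    · simp only [hlt, if_false]
      have hmem' : t ∈ m :: rest' := by
        by_cases hty : t = y
        · subst hty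
          have h1 := hmin m (by simp)
          have h2 : key m = k := by omega
          have := huniq m (by simp) h2
          simp [← this]
        · simp at hmem ⊢; tauto
      apply ih m
      · intro x hx; exact hmin x (by simp at hx ⊢; tauto)
      · exact hk
      · intro x hx hxk; exact huniq x (by simp at hx ⊢; tauto) hxk
      · exact hmem'

-- a key one larger on every element seen leaves min?'s fold unchanged
lemma foldMin_shift {key1 key2 : String → Int} :
    ∀ (rest : List String) (m : String), (∀ x ∈ m :: rest, key1 x = key2 x + 1) →
      rest.foldl (mstep key1) (some m) = rest.foldl (mstep key2) (some m) := by
  intro rest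
  induction rest with
  | nil => intro m _; rfl
  | cons y rest' ih =>
    intro m hsh
    have hy := hsh y (by simp)
    have hm := hsh m (by simp)
    simp only [List.foldl_cons, mstep]
    by_cases h : key2 y < key2 m
    · rw [if_pos (show key1 y < key1 m by omega), if_pos h]
      exact ih y (fun x hx => hsh x (by simp at hx ⊢; tauto))
    · rw [if_neg (show ¬ key1 y < key1 m by omega), if_neg h]
      exact ih m (fun x hx => hsh x (by simp at hx ⊢; tauto))

-- when all keys are equal the fold keeps the first element
lemma foldMin_const {key : String → Int} (k : Int) :
    ∀ (rest : List String) (m : String), (∀ x ∈ rest, key x = k) → key m = k →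
      rest.foldl (mstep key) (some m) = some m := by
  intro rest
  induction rest with
  | nil => intro m _ _; rfl
  | cons y rest' ih =>
    intro m hall hm
    simp only [List.foldl_cons, mstep]
    have hy : key y = k := hall y (by simp)
    have hlt : ¬ key y < key m := by omega
    simp only [hlt, if_false]
    exact ih m (fun x hx => hall x (by simp [hx])) hm

-- A's early-return loop equals B's rank-keyed min, for every preferred list
lemma main_lemma (prefs : List String) (c : String) (cs : List String) :
    (match firstPref (c :: cs) prefs with
     | some name => name
     | none => (c :: cs).headD "") =
    (match PySem.List.min? (c :: cs) (fun x => rkIdx prefs x) with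
     | some m => m
     | none => "") := by
  induction prefs with
  | nil =>
    have hmin : PySem.List.min? (c :: cs) (fun x => rkIdx [] x) = some c := by
      rw [min?_cons]
      exact foldMin_const 0 cs c (fun x _ => rfl) rfl
    simp [firstPref, hmin]
  | cons p ps ih =>
    by_cases hp : p ∈ c :: cs
    · have hmin : PySem.List.min? (c :: cs) (fun x => rkIdx (p :: ps) x) = some p := by
        rw [min?_cons]
        apply foldMin_eq_unique 0 p
        · intro x _; exact rkIdx_nonneg (p :: ps) x
        · simp [rkIdx]
        · intro x _ hxk
          by_contra hxp
          have h0 := rkIdx_nonneg ps x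
          simp only [rkIdx, if_neg hxp] at hxk
          omega
        · exact hp
      simp [firstPref, hp, hmin]
    · have hkey : PySem.List.min? (c :: cs) (fun x => rkIdx (p :: ps) x) =
          PySem.List.min? (c :: cs) (fun x => rkIdx ps x) := by
        rw [min?_cons, min?_cons]
        apply foldMin_shift cs c
        intro x hx
        have hxp : x ≠ p := by rintro rfl; exact hp hx
        simp [rkIdx, hxp]
      rw [hkey]
      simpa [firstPref, hp] using ih

-- ===== VERDICT (by name: the statement is the Claim_ definition above) =====
theorem choose_baseline_prefix_py_spec : Claim_equal_choose_baseline_prefix_py := by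
  intro role_cat candidates _ hpre
  unfold Spec_choose_baseline_prefix_py
  obtain ⟨c, cs, rfl⟩ : ∃ c cs, candidates = c :: cs := by
    cases candidates with
    | nil => exact absurd rfl hpre
    | cons c cs => exact ⟨c, cs, rfl⟩
  unfold choose_baseline_prefix_py choose_baseline_prefix_py_alt
  simp only [reduceCtorEq, if_false]
  have hkey : (fun x => (rankDict (preferredPerRole.getD (PySem.Str.lower role_cat) [])).getD x
      ((preferredPerRole.getD (PySem.Str.lower role_cat) []).length : Int)) =
      (fun x => rkIdx (preferredPerRole.getD (PySem.Str.lower role_cat) []) x) := by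
    funext x
    exact rank_getD_eq _ (prefs_nodup _) x
  rw [hkey]
  exact main_lemma _ c cs
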